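-- pv_equiv track=rewrite | github.com/devforfu/codility | leader.py | left_leaders
-- ===== SOURCE A (Python) =====
-- def left_leaders(A, leader):
--     curr, same = 0, []
--     A = A[:-1]
--     for length, x in enumerate(A, 1):
--         if x == leader:
--             curr += 1
--         same.append(curr > (length // 2))
--     return same
-- ===== SOURCE B (Python) =====
-- def left_leaders(A, leader):
--     body = A[:-1]
--     occ = [i for i, x in enumerate(body) if x == leader]
--
--     def count_below(limit):
--         # number of occurrence indices < limit, by binary search on the sorted list occ
--         lo, hi = 0, len(occ)
--         while lo < hi:
--             mid = (lo + hi) // 2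
--             if occ[mid] < limit:
--                 lo = mid + 1
--             else:
--                 hi = mid
--         return lo
--
--     return [count_below(length) > length // 2 for length in range(1, len(body) + 1)]
-- ===== Notes on version B (the rewrite author's own statement) =====
-- stated objective: alternative
-- what changed: Instead of A's fused running counter, B builds the sorted list of occurrence indices of the leader once and answers each prefix's majority test by a hand-written binary search (count of indices < L) over that list.
import Mathlib
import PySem

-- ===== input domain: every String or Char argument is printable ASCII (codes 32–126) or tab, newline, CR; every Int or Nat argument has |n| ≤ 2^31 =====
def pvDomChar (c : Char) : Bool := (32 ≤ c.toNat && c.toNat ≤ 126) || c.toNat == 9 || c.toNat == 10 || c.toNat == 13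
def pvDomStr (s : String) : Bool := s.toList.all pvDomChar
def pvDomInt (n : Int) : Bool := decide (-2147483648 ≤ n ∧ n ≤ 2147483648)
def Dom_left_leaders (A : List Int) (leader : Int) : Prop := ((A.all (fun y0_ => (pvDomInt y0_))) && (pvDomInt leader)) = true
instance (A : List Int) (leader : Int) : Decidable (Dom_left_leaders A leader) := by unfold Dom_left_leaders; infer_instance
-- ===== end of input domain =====

-- B replaces A's fused running-counter loop by an occurrence-index list queried with a
-- hand-written binary search per prefix; alternative algorithm, no behavioural change.

-- ===== PORT A =====
-- literal port of A: one loop over enumerate(A[:-1], 1) carrying (curr, same)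
def left_leaders (A : List Int) (leader : Int) : List Bool :=
  let A' := PySem.List.slice A none (some (-1))
  ((PySem.List.enumerate A' 1).foldl
    (fun (st : Int × List Bool) p =>
      let curr := if p.2 == leader then st.1 + 1 else st.1
      (curr, st.2 ++ [decide (curr > PySem.Int.floordiv p.1 2)]))
    (0, [])).2

-- ===== PORT B =====
-- B-side helper: the hand-written binary-search loop 'count_below' of Source B
-- (lo, hi are always nonnegative in the Python, so they are carried as Nat;
--  occ[mid] is always in range since lo < hi ≤ len(occ), so getD is exact)
def pvCountBelow (occ : List Int) (limit : Int) (lo hi : Nat) : Nat :=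
  if lo < hi then
    let mid := (lo + hi) / 2
    if occ.getD mid 0 < limit then pvCountBelow occ limit (mid + 1) hi
    else pvCountBelow occ limit lo mid
  else lo
termination_by hi - lo
decreasing_by all_goals omega

-- literal port of B: occurrence indices of leader, then binary search per prefix length
def left_leaders_alt (A : List Int) (leader : Int) : List Bool :=
  let body := PySem.List.slice A none (some (-1))
  let occ := ((PySem.List.enumerate body 0).filter (fun p => p.2 == leader)).map (·.1)
  (PySem.List.pyRange 1 ((body.length : Int) + 1) 1).map
    (fun length => decide ((pvCountBelow occ length 0 occ.length : Int) > PySem.Int.floordiv length 2))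

-- ===== PRECONDITION & SPEC =====
def Spec_left_leaders (A : List Int) (leader : Int) (out : List Bool) : Prop := out = left_leaders_alt A leader
instance (A : List Int) (leader : Int) (out : List Bool) : Decidable (Spec_left_leaders A leader out) := by unfold Spec_left_leaders; infer_instance

-- ===== CLAIM (what is proved, stated in full; the proofs are below) =====
def Claim_equal_left_leaders : Prop := ∀ (A : List Int) (leader : Int), Dom_left_leaders A leader → Spec_left_leaders A leader (left_leaders A leader)

-- ===== LEMMAS AND PROOFS =====

-- running prefix sums: the mathematical shape of A's counter
def pvScan (c : Int) : List Int → List Int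
  | [] => []
  | f :: fs => (c + f) :: pvScan (c + f) fs

-- A's fused loop equals the comparison map over the enumerated prefix sums
theorem pvA_fold (leader : Int) (l : List Int) (c : Int) (s : Int) (acc : List Bool) :
    (((PySem.List.enumerate l s).foldl
      (fun (st : Int × List Bool) p =>
        let curr := if p.2 == leader then st.1 + 1 else st.1
        (curr, st.2 ++ [decide (curr > PySem.Int.floordiv p.1 2)]))
      (c, acc)).2)
      = acc ++ (PySem.List.enumerate (pvScan c (l.map (fun x => if x == leader then (1 : Int) else 0))) s).map
          (fun p => decide (p.2 > PySem.Int.floordiv p.1 2)) := by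
  induction l generalizing c s acc with
  | nil => simp [pvScan, PySem.List.enumerate_nil]
  | cons x xs ih =>
    simp only [PySem.List.enumerate_cons, List.foldl, List.map, pvScan]
    rw [ih]
    by_cases h : x = leader <;> simp [h, List.append_assoc]

theorem pvScan_length (c : Int) (l : List Int) : (pvScan c l).length = l.length := by
  induction l generalizing c with
  | nil => rfl
  | cons f fs ih => simp [pvScan, ih]

theorem pvScan_getElem (c : Int) (l : List Int) (k : Nat) (hk : k < (pvScan c l).length) :
    (pvScan c l)[k] = c + (l.take (k + 1)).sum := by
  induction l generalizing c k with
  | nil => simp [pvScan] at hk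
  | cons f fs ih =>
    cases k with
    | zero => simp [pvScan]
    | succ m =>
      simp only [pvScan, List.getElem_cons_succ, List.take_succ_cons, List.sum_cons]
      rw [ih (c + f) m (by simpa [pvScan, pvScan_length] using hk)]
      ring

-- occurrence-index list of leader in body, indices starting at s
def pvOcc (leader : Int) (body : List Int) (s : Int) : List Int :=
  ((PySem.List.enumerate body s).filter (fun p => p.2 == leader)).map (·.1)

theorem pvOcc_lb (leader : Int) (body : List Int) (s : Int) :
    ∀ e ∈ pvOcc leader body s, s ≤ e := by
  induction body generalizing s with
  | nil => simp [pvOcc, PySem.List.enumerate_nil]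
  | cons x xs ih =>
    intro e he
    simp only [pvOcc, PySem.List.enumerate_cons, List.filter_cons] at he
    by_cases h : x = leader
    · simp [h] at he
      rcases he with rfl | he
      · exact le_refl _
      · have := ih (s + 1) e (by simpa [pvOcc] using he)
        omega
    · simp [h] at he
      have := ih (s + 1) e (by simpa [pvOcc] using he)
      omega

theorem pvOcc_sorted (leader : Int) (body : List Int) (s : Int) :
    (pvOcc leader body s).Pairwise (· ≤ ·) := by
  induction body generalizing s with
  | nil => simp [pvOcc, PySem.List.enumerate_nil]
  | cons x xs ih =>
    simp only [pvOcc, PySem.List.enumerate_cons, List.filter_cons]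
    by_cases h : x = leader
    · simp only [h, BEq.rfl, if_pos, List.map_cons]
      refine List.pairwise_cons.mpr ⟨?_, by simpa [pvOcc] using ih (s + 1)⟩
      intro e he
      have := pvOcc_lb leader xs (s + 1) e (by simpa [pvOcc] using he)
      omega
    · simpa [h, pvOcc] using ih (s + 1)

-- counting occurrence indices below a limit counts leader occurrences in the prefix
theorem pvOcc_countP (leader : Int) (body : List Int) (s : Nat) (L : Nat) :
    (pvOcc leader body (s : Int)).countP (fun x => decide (x < (s : Int) + (L : Int)))
      = (body.take L).countP (fun x => x == leader) := by
  induction body generalizing s L with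
  | nil => simp [pvOcc, PySem.List.enumerate_nil]
  | cons x xs ih =>
    cases L with
    | zero =>
      simp only [List.take_zero, List.countP_nil, Nat.cast_zero, add_zero]
      rw [List.countP_eq_zero]
      intro e he
      have := pvOcc_lb leader (x :: xs) (s : Int) e he
      simp
      omega
    | succ m =>
      simp only [pvOcc, PySem.List.enumerate_cons, List.filter_cons, List.take_succ_cons,
        List.countP_cons]
      have hih := ih (s + 1) m
      simp only [pvOcc] at hih
      have hse : (((s + 1 : Nat)) : Int) = (s : Int) + 1 := by push_cast; ring
      rw [hse] at hih
      have harith : ((s : Int)) + ((m + 1 : Nat) : Int) = ((s : Int) + 1) + (m : Int) := by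
        push_cast; ring
      by_cases h : x = leader
      · simp only [h, BEq.rfl, if_pos, List.map_cons, List.countP_cons]
        rw [harith, hih]
        have hd : ((s : Int)) < ((s : Int) + 1) + (m : Int) := by omega
        simp [hd]
      · have hx : (x == leader) = false := by simp [h]
        simp only [hx, Bool.false_eq_true, if_false]
        rw [harith, hih]
        simp

-- on a sorted list the elements below the limit are exactly a prefix
theorem pvSorted_char (occ : List Int) (L : Int) (hs : occ.Pairwise (· ≤ ·)) :
    ∀ i, i < occ.length →
      (occ.getD i 0 < L ↔ i < occ.countP (fun x => decide (x < L))) := by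
  induction occ with
  | nil => intro i hi; simp at hi
  | cons a as ih =>
    rcases List.pairwise_cons.mp hs with ⟨ha, has⟩
    intro i hi
    by_cases hA : a < L
    · have hc : (a :: as).countP (fun x => decide (x < L))
          = as.countP (fun x => decide (x < L)) + 1 := by
        simp [hA]
      cases i with
      | zero => simpa [hc, hA] using Nat.succ_pos _
      | succ m =>
        have := ih has m (by simp at hi ⊢; omega)
        simpa [hc] using this
    · have hz : (a :: as).countP (fun x => decide (x < L)) = 0 := by
        rw [List.countP_eq_zero]
        intro e he
        rcases List.mem_cons.mp he with rfl | he
        · simpa using hA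
        · have := ha e he; simp; omega
      rw [hz]
      cases i with
      | zero => simpa using hA
      | succ m =>
        simp only [List.getD_cons_succ]
        constructor
        · intro hlt
          exfalso
          have hm : m < as.length := by simpa using hi
          have hmem : as[m] ∈ as := List.getElem_mem hm
          have h1 := ha _ hmem
          have : as.getD m 0 = as[m] := List.getD_eq_getElem as 0 hm
          omega
        · omega

-- the binary search returns the count of elements below the limit
theorem pvCountBelow_eq (occ : List Int) (L : Int) (hs : occ.Pairwise (· ≤ ·)) :
    ∀ lo hi, lo ≤ occ.countP (fun x => decide (x < L)) →
      occ.countP (fun x => decide (x < L)) ≤ hi → hi ≤ occ.length →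
      pvCountBelow occ L lo hi = occ.countP (fun x => decide (x < L)) := by
  intro lo hi
  induction lo, hi using pvCountBelow.induct occ L with
  | case1 lo hi hlt mid hmidlt ih =>
    intro h1 h2 h3
    have hb : lo ≤ mid ∧ mid < hi := by simp only [mid]; omega
    have hcnt := (pvSorted_char occ L hs mid (by omega)).mp hmidlt
    rw [pvCountBelow, if_pos hlt]
    show (if occ.getD mid 0 < L then pvCountBelow occ L (mid + 1) hi
      else pvCountBelow occ L lo mid) = _
    rw [if_pos hmidlt]
    exact ih (by omega) h2 h3
  | case2 lo hi hlt mid hmidge ih =>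
    intro h1 h2 h3
    have hb : lo ≤ mid ∧ mid < hi := by simp only [mid]; omega
    have hk : ¬ mid < occ.countP (fun x => decide (x < L)) := fun hk =>
      hmidge ((pvSorted_char occ L hs mid (by omega)).mpr hk)
    rw [pvCountBelow, if_pos hlt]
    show (if occ.getD mid 0 < L then pvCountBelow occ L (mid + 1) hi
      else pvCountBelow occ L lo mid) = _
    rw [if_neg hmidge]
    exact ih h1 (by omega) (by omega)
  | case3 lo hi hge =>
    intro h1 h2 h3
    rw [pvCountBelow]
    simp only [if_neg hge]
    omega

-- ===== VERDICT (by name: the statement is the Claim_ definition above) =====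
theorem left_leaders_spec : Claim_equal_left_leaders := by
  intro A leader _
  unfold Spec_left_leaders
  unfold left_leaders left_leaders_alt
  rw [pvA_fold]
  simp only [List.nil_append]
  set body := PySem.List.slice A none (some (-1)) with hbody
  apply List.ext_getElem
  · simp [PySem.List.length_enumerate, pvScan_length, PySem.List.length_pyRange_one]
  · intro k h1 h2
    simp only [List.getElem_map, PySem.List.getElem_enumerate, PySem.List.getElem_pyRange_one]
    have hk : k < body.length := by
      simpa [PySem.List.length_enumerate, pvScan_length] using h1
    rw [pvScan_getElem _ _ k (by simpa [pvScan_length] using hk)]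
    rw [← List.map_take]
    rw [PySem.List.sum_map_ite_one_zero]
    rw [show ((PySem.List.enumerate body 0).filter (fun p => p.2 == leader)).map (·.1)
        = pvOcc leader body 0 from rfl]
    have hcnt := pvCountBelow_eq (pvOcc leader body 0) (1 + (k : Int))
      (pvOcc_sorted leader body 0) 0 (pvOcc leader body 0).length
      (Nat.zero_le _) List.countP_le_length (le_refl _)
    have hc2 := pvOcc_countP leader body 0 (k + 1)
    have hL : (((0 : Nat)) : Int) + ((k + 1 : Nat) : Int) = 1 + (k : Int) := by push_cast; ring
    rw [hL] at hc2
    rw [hcnt]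
    simp only [Nat.cast_zero] at hc2
    rw [hc2]
    simp
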